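-- pv_equiv track=rewrite | github.com/CHANCHALCHAVHAN/Company_Problem-statement-and-its-Solutions | Shubham's Nobel Warriors.py | count_valid_teams
-- ===== SOURCE A (Python) =====
-- from itertools import combinations
--
-- def count_valid_teams(n, k, strengths):
--     def is_valid_team(team):
--         # Check if no two knights in the team have a difference of exactly K
--         for i in range(len(team)):
--             for j in range(i + 1, len(team)):
--                 if abs(team[i] - team[j]) == k:
--                     return False
--         return True
--
--     valid_team_count = 0
--     # Generate all subsets of knights' strengths
--     for r in range(1, n + 1):  # From subsets of size 1 to n
--         for team in combinations(strengths, r):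
--             if is_valid_team(team):
--                 valid_team_count += 1
--
--     return valid_team_count
-- ===== SOURCE B (Python) =====
-- def count_valid_teams(n, k, strengths):
--     # Grow the collection of valid teams one knight at a time: for each new
--     # strength x, every already-found valid team (of size < n) that x is
--     # compatible with spawns a new team with x added.  The empty team is
--     # carried along and subtracted at the end.
--     teams = [[]]
--     for x in strengths:
--         teams += [t + [x] for t in teams
--                   if len(t) < n and all(abs(x - y) != k for y in t)]
--     return len(teams) - 1
-- ===== Notes on version B (the rewrite author's own statement) =====
-- stated objective: alternative
-- what changed: Replaces the generate-and-test loop over combinations(strengths, r) for every size r (each subset re-checked pairwise) with a single pass that grows the collection of valid teams incrementally, extending each found team by the new element only when it stays valid and under the size cap.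
import Mathlib
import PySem

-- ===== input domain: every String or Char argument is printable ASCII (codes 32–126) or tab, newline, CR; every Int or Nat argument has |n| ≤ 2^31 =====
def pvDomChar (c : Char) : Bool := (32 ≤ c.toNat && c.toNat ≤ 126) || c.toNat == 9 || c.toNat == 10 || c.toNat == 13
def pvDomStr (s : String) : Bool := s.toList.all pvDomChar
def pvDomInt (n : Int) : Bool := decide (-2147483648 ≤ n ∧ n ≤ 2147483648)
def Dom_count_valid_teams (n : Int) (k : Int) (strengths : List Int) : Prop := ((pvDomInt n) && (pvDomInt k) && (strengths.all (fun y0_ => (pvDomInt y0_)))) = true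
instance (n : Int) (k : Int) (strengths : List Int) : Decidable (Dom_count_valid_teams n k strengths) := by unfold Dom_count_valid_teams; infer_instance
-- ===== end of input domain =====

-- B replaces A's per-size combinations enumeration with one pass that grows
-- the list of valid teams incrementally, adding each new element only to
-- compatible teams below the size cap (alternative algorithm, same cost).

-- ===== PORT A =====
-- is_valid_team: the two index loops with early return False, as nested `all`.
def pvIsValid (k : Int) (team : List Int) : Bool :=
  (List.range team.length).all fun i =>
    (List.range' (i + 1) (team.length - (i + 1))).all fun j =>
      !(|team.getD i 0 - team.getD j 0| == k)

-- itertools.combinations(xs, r) in Python's (lexicographic-by-index) order.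
def pvCombos : Nat → List Int → List (List Int)
  | 0, _ => [[]]
  | _ + 1, [] => []
  | r + 1, x :: xs => (pvCombos r xs).map (fun c => x :: c) ++ pvCombos (r + 1) xs

def count_valid_teams (n : Int) (k : Int) (strengths : List Int) : Int :=
  (PySem.List.pyRange 1 (n + 1) 1).foldl
    (fun acc r => acc + ((pvCombos r.toNat strengths).countP (pvIsValid k) : Int)) 0

-- ===== PORT B =====
-- all(abs(x - y) != k for y in t)
def pvCompat (k : Int) (x : Int) (chosen : List Int) : Bool :=
  chosen.all fun y => !(|x - y| == k)

-- one iteration of Source B's for-loop: teams += [t + [x] for t in teams if ...]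
def pvStep (n k : Int) (teams : List (List Int)) (x : Int) : List (List Int) :=
  teams ++ (teams.filter (fun t => (t.length : Int) < n && pvCompat k x t)).map
    (fun t => t ++ [x])

def count_valid_teams_alt (n : Int) (k : Int) (strengths : List Int) : Int :=
  ((strengths.foldl (pvStep n k) [[]]).length : Int) - 1


-- ===== PRECONDITION & SPEC =====
def Spec_count_valid_teams (n : Int) (k : Int) (strengths : List Int) (out : Int) : Prop := out = count_valid_teams_alt n k strengths
instance (n : Int) (k : Int) (strengths : List Int) (out : Int) : Decidable (Spec_count_valid_teams n k strengths out) := by unfold Spec_count_valid_teams; infer_instance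

-- ===== CLAIM (what is proved, stated in full; the proofs are below) =====
def Claim_equal_count_valid_teams : Prop := ∀ (n : Int) (k : Int) (strengths : List Int), Dom_count_valid_teams n k strengths → Spec_count_valid_teams n k strengths (count_valid_teams n k strengths)

-- ===== LEMMAS AND PROOFS =====

-- Proof-side recursive count of valid extensions of `chosen` by a subsequence of the rest.
def pvCnt (n k : Int) : List Int → List Int → Int
  | [], _ => 1
  | x :: xs, chosen =>
      (if ((chosen.length : Int) < n && pvCompat k x chosen) then pvCnt n k xs (chosen ++ [x]) else 0)
      + pvCnt n k xs chosen

-- All subsequences of xs (positional subsets).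
def pvSubs : List Int → List (List Int)
  | [] => [[]]
  | x :: xs => (pvSubs xs).map (fun t => x :: t) ++ pvSubs xs

-- Whether backtracking starting from `chosen` accepts extension t.
def pvGood (n k : Int) : List Int → List Int → Bool
  | _, [] => true
  | chosen, x :: t =>
      (((chosen.length : Int) < n && pvCompat k x chosen)) && pvGood n k (chosen ++ [x]) t


theorem pvSumFilter (p : List Int → Bool) (f : List Int → Int) (l : List (List Int)) :
    ((l.filter p).map f).sum = (l.map (fun t => if p t then f t else 0)).sum := by
  induction l with
  | nil => simp
  | cons t l ih =>
      by_cases hp : p t = true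
      · simp [hp, ih]
      · simp only [List.filter_cons, Bool.not_eq_true] at *
        simp [hp, ih]

theorem pvFoldl_length (n k : Int) :
    ∀ (xs : List Int) (acc : List (List Int)),
      (((xs.foldl (pvStep n k) acc).length : Int))
        = (acc.map (fun t => pvCnt n k xs t)).sum := by
  intro xs
  induction xs with
  | nil =>
      intro acc
      simp only [List.foldl_nil]
      induction acc with
      | nil => simp
      | cons t acc ih =>
          simp only [List.map_cons, List.sum_cons, List.length_cons]
          rw [show pvCnt n k [] t = 1 from rfl, ← ih]
          push_cast
          ring
  | cons x xs ih =>
      intro acc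
      rw [List.foldl_cons, ih (pvStep n k acc x)]
      unfold pvStep
      rw [List.map_append, List.sum_append, List.map_map]
      have hfil : ((acc.filter (fun t => (t.length : Int) < n && pvCompat k x t)).map
            ((fun t => pvCnt n k xs t) ∘ fun t => t ++ [x])).sum
          = (acc.map (fun t => if ((t.length : Int) < n && pvCompat k x t)
                then pvCnt n k xs (t ++ [x]) else 0)).sum :=
        pvSumFilter _ _ acc
      rw [hfil, ← PySem.List.sum_map_add_int]
      congr 1
      apply List.map_congr_left
      intro t _
      rw [pvCnt]
      ring

theorem pvCnt_eq_countP (n k : Int) :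
    ∀ (xs chosen : List Int),
      pvCnt n k xs chosen = ((pvSubs xs).countP (pvGood n k chosen) : Int) := by
  intro xs
  induction xs with
  | nil => intro chosen; simp [pvCnt, pvSubs, pvGood]
  | cons x xs ih =>
      intro chosen
      rw [pvCnt]
      simp only [pvSubs, List.countP_append, List.countP_map]
      by_cases hc : (((chosen.length : Int) < n && pvCompat k x chosen)) = true
      · rw [if_pos hc, ih, ih]
        have hcong : (pvSubs xs).countP (pvGood n k chosen ∘ fun t => x :: t)
            = (pvSubs xs).countP (pvGood n k (chosen ++ [x])) := by
          apply List.countP_congr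
          intro t _
          simp [Function.comp, pvGood, hc]
        rw [hcong]
        push_cast
        ring
      · rw [if_neg hc, ih]
        have hz : (pvSubs xs).countP (pvGood n k chosen ∘ fun t => x :: t) = 0 := by
          rw [List.countP_eq_zero]
          intro t _
          simp only [Function.comp, pvGood]
          simp [hc]
        rw [hz]
        push_cast
        ring

theorem pvCombos_countP :
    ∀ (xs : List Int) (r : Nat) (q : List Int → Bool),
      (pvCombos r xs).countP q
        = (pvSubs xs).countP (fun t => q t && (t.length == r)) := by
  intro xs
  induction xs with
  | nil =>
      intro r q
      cases r <;> simp [pvCombos, pvSubs]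
  | cons x xs ih =>
      intro r q
      cases r with
      | zero =>
          simp only [pvCombos, pvSubs, List.countP_append, List.countP_map]
          have hz : (pvSubs xs).countP ((fun t => q t && (t.length == 0)) ∘ fun t => x :: t) = 0 := by
            rw [List.countP_eq_zero]
            intro t _
            simp [Function.comp]
          rw [hz, ← ih 0 q]
          simp [pvCombos]
      | succ r =>
          simp only [pvCombos, List.countP_append, List.countP_map, pvSubs,
            Function.comp_def]
          rw [ih r (fun t => q (x :: t)), ih (r + 1) q]
          congr 1
          apply List.countP_congr
          intro t _
          have hb : ((x :: t).length == r + 1) = (t.length == r) := by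
            by_cases h : t.length = r
            · subst h; simp
            · rw [beq_eq_false_iff_ne.mpr (by simp [List.length_cons]; omega),
                beq_eq_false_iff_ne.mpr h]
          rw [hb]

theorem pvIsValid_iff (k : Int) (t : List Int) :
    pvIsValid k t = true ↔ List.Pairwise (fun a b => ¬(|a - b| = k)) t := by
  unfold pvIsValid
  rw [List.pairwise_iff_getElem]
  simp only [List.all_eq_true, List.mem_range, List.mem_range'_1,
    Bool.not_eq_eq_eq_not, Bool.not_true, beq_eq_false_iff_ne, ne_eq, and_imp]
  constructor
  · intro h i j hi hj hij
    have h2 := h i hi j (by omega) (by omega)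
    rwa [List.getD_eq_getElem t 0 hi, List.getD_eq_getElem t 0 hj] at h2
  · intro h i hi j hj1 hj2
    have hjlt : j < t.length := by omega
    rw [List.getD_eq_getElem t 0 hi, List.getD_eq_getElem t 0 hjlt]
    exact h i j hi hjlt (by omega)

theorem pvGood_char (n k : Int) :
    ∀ (t chosen : List Int), List.Pairwise (fun a b => ¬(|a - b| = k)) chosen →
      pvGood n k chosen t
        = (if t.isEmpty then true
           else decide (((chosen.length : Int) + t.length ≤ n))
                && decide (List.Pairwise (fun a b => ¬(|a - b| = k)) (chosen ++ t))) := by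
  intro t
  induction t with
  | nil => intro chosen _; simp [pvGood]
  | cons x t ih =>
      intro chosen hpw
      rw [pvGood]
      by_cases hcompat : pvCompat k x chosen = true
      · have hall := List.all_eq_true.mp hcompat
        have hpwx : List.Pairwise (fun a b => ¬(|a - b| = k)) (chosen ++ [x]) := by
          rw [List.pairwise_append]
          refine ⟨hpw, List.pairwise_singleton _ _, ?_⟩
          intro a ha b hb
          rw [List.mem_singleton] at hb
          subst hb
          have h2 := hall a ha
          simp only [Bool.not_eq_eq_eq_not, Bool.not_true, beq_eq_false_iff_ne, ne_eq] at h2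
          rw [abs_sub_comm]
          exact h2
        rw [ih (chosen ++ [x]) hpwx]
        rw [show chosen ++ [x] ++ t = chosen ++ x :: t from by simp]
        cases t with
        | nil =>
            simp only [List.isEmpty_nil, if_true, List.isEmpty_cons, Bool.false_eq_true,
              if_false, hcompat, Bool.and_true]
            rw [decide_eq_true hpwx]
            simp only [Bool.and_true]
            exact decide_eq_decide.mpr
              (by push_cast [List.length_singleton, List.length_nil]; omega)
        | cons y t' =>
            simp only [List.isEmpty_cons, Bool.false_eq_true, if_false, hcompat, Bool.and_true]
            by_cases hle : ((chosen.length : Int) + ((x :: y :: t').length : Int) ≤ n)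
            · have hlt : ((chosen.length : Int) < n) := by
                push_cast [List.length_cons] at hle ⊢; omega
              have hle2 : (((chosen ++ [x]).length : Int) + ((y :: t').length : Int) ≤ n) := by
                push_cast [List.length_append, List.length_cons, List.length_singleton, List.length_nil] at hle ⊢
                omega
              rw [decide_eq_true hle, decide_eq_true hlt, decide_eq_true hle2]
              simp
            · have hle2 : ¬ (((chosen ++ [x]).length : Int) + ((y :: t').length : Int) ≤ n) := by
                push_cast [List.length_append, List.length_cons, List.length_singleton, List.length_nil] at hle ⊢
                omega
              rw [decide_eq_false hle, decide_eq_false hle2]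
              simp
      · have hfalse : pvCompat k x chosen = false := by
          cases hb : pvCompat k x chosen
          · rfl
          · exact absurd hb hcompat
        obtain ⟨y, hy, hk⟩ : ∃ y ∈ chosen, |x - y| = k := by
          unfold pvCompat at hfalse
          rw [List.all_eq_false] at hfalse
          obtain ⟨y, hy, hyk⟩ := hfalse
          refine ⟨y, hy, ?_⟩
          simpa using hyk
        have hnp : ¬ List.Pairwise (fun a b => ¬(|a - b| = k)) (chosen ++ x :: t) := by
          intro hfull
          rw [List.pairwise_append] at hfull
          exact (hfull.2.2 y hy x (by simp)) (by rw [abs_sub_comm]; exact hk)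
        simp [hfalse, decide_eq_false hnp]

theorem pvSubs_empty_count (xs : List Int) :
    (pvSubs xs).countP (fun t => t.isEmpty) = 1 := by
  induction xs with
  | nil => simp [pvSubs]
  | cons x xs ih =>
      simp only [pvSubs, List.countP_append, List.countP_map]
      have hz : (pvSubs xs).countP ((fun t : List Int => t.isEmpty) ∘ fun t => x :: t) = 0 := by
        rw [List.countP_eq_zero]; intro t _; simp [Function.comp]
      rw [hz, ih]

theorem pvRangeSum (m L : Nat) (c : Bool) :
    ((List.range m).map (fun i => if c && (L == i + 1) then (1 : Int) else 0)).sum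
      = if c && decide (1 ≤ L ∧ L ≤ m) then 1 else 0 := by
  induction m with
  | zero =>
      cases c
      · simp
      · simp only [List.range_zero, List.map_nil, List.sum_nil, Bool.true_and,
          decide_eq_true_eq]
        rw [if_neg (by omega)]
  | succ m ih =>
      rw [List.range_succ, List.map_append, List.sum_append, ih]
      simp only [List.map_cons, List.map_nil, List.sum_cons, List.sum_nil, add_zero]
      cases c with
      | false => simp
      | true =>
          simp only [Bool.true_and, beq_iff_eq, decide_eq_true_eq]
          split_ifs <;> omega

theorem pvPerElem (n k : Int) (t : List Int) :
    ((List.range n.toNat).map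
        (fun i => if pvIsValid k t && (t.length == i + 1) then (1 : Int) else 0)).sum
      + (if t.isEmpty then (1 : Int) else 0)
      = if pvGood n k [] t then 1 else 0 := by
  rw [pvRangeSum n.toNat t.length (pvIsValid k t)]
  rw [pvGood_char n k t [] List.Pairwise.nil]
  cases t with
  | nil => simp
  | cons y t' =>
      simp only [List.isEmpty_cons, Bool.false_eq_true, if_false, add_zero, List.nil_append]
      have hiv : pvIsValid k (y :: t')
          = decide (List.Pairwise (fun a b => ¬(|a - b| = k)) (y :: t')) := by
        by_cases hp : List.Pairwise (fun a b => ¬(|a - b| = k)) (y :: t')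
        · rw [decide_eq_true hp]; exact (pvIsValid_iff k _).mpr hp
        · rw [decide_eq_false hp]
          cases hb : pvIsValid k (y :: t')
          · rfl
          · exact absurd ((pvIsValid_iff k _).mp hb) hp
      rw [hiv]
      have hlen : (1 ≤ (y :: t').length ∧ (y :: t').length ≤ n.toNat)
          ↔ (((([] : List Int).length : Int)) + ((y :: t').length : Int) ≤ n) := by
        simp only [List.length_nil, Nat.cast_zero, zero_add, List.length_cons]
        omega
      rw [decide_eq_decide.mpr hlen]
      have hcomm : (decide (List.Pairwise (fun a b => ¬(|a - b| = k)) (y :: t'))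
            && decide ((([] : List Int).length : Int) + ((y :: t').length : Int) ≤ n))
          = (decide ((([] : List Int).length : Int) + ((y :: t').length : Int) ≤ n)
            && decide (List.Pairwise (fun a b => ¬(|a - b| = k)) (y :: t'))) :=
        Bool.and_comm _ _
      rw [hcomm]
      rfl

theorem pvSum_eq (n k : Int) (L : List (List Int)) :
    ((List.range n.toNat).map
        (fun i => ((L.countP (fun t => pvIsValid k t && (t.length == i + 1)) : Nat) : Int))).sum
      + (L.countP (fun t => t.isEmpty) : Int)
      = (L.countP (pvGood n k []) : Int) := by
  induction L with
  | nil => simp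
  | cons t L' ih =>
      simp only [List.countP_cons]
      push_cast
      rw [PySem.List.sum_map_add_int]
      have h1 := pvPerElem n k t
      linarith [ih, h1]

theorem pvMain (n k : Int) (strengths : List Int) :
    count_valid_teams n k strengths = count_valid_teams_alt n k strengths := by
  unfold count_valid_teams count_valid_teams_alt
  rw [pvFoldl_length]
  simp only [List.map_cons, List.map_nil, List.sum_cons, List.sum_nil, add_zero]
  rw [pvCnt_eq_countP]
  rw [PySem.List.foldl_add]
  rw [PySem.List.pyRange_one]
  rw [List.map_map]
  have hmap : (List.range ((n + 1 - 1)).toNat).map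
        ((fun r : Int => (((pvCombos r.toNat strengths).countP (pvIsValid k) : Nat) : Int))
          ∘ (fun k_ : Nat => (1 : Int) + ↑k_))
      = (List.range n.toNat).map
        (fun i => (((pvSubs strengths).countP
            (fun t => pvIsValid k t && (t.length == i + 1)) : Nat) : Int)) := by
    have hnn : (n + 1 - 1).toNat = n.toNat := by omega
    rw [hnn]
    apply List.map_congr_left
    intro i _
    have h1 : ((1 : Int) + (i : Int)).toNat = i + 1 := by omega
    simp only [Function.comp]
    rw [h1, pvCombos_countP strengths (i + 1) (pvIsValid k)]
  rw [hmap]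
  have hsum := pvSum_eq n k (pvSubs strengths)
  rw [pvSubs_empty_count strengths] at hsum
  push_cast at hsum
  linarith [hsum]

-- ===== VERDICT (by name: the statement is the Claim_ definition above) =====
theorem count_valid_teams_spec : Claim_equal_count_valid_teams := by
  intro n k strengths _
  unfold Spec_count_valid_teams
  exact pvMain n k strengths
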